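-- pv_equiv track=rewrite | github.com/satyam8254/Python-program | python-code/diffOfSumOfEvenOddIndex.py | difference_sum_even_odd_index
-- ===== SOURCE A (Python) =====
-- def  difference_sum_even_odd_index(numbers):
--     odd=0
--     even=0
--     for i in range(len(numbers)):
--         if i%2!=0:
--             odd=odd+numbers[i]
--         elif i%2==0:
--             even=even+numbers[i]
--         elif len(numbers)==0:
--             return 0
--     diff=even-odd
--     return diff
-- ===== SOURCE B (Python) =====
-- def difference_sum_even_odd_index(numbers):
--     # Consume the list pairwise with an iterator: add the element at the even
--     # position, subtract its odd-position partner (0 if the list ends).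
--     total = 0
--     it = iter(numbers)
--     for x in it:
--         total += x
--         total -= next(it, 0)
--     return total
-- ===== Notes on version B (the rewrite author's own statement) =====
-- stated objective: simpler
-- what changed: Replaced the index loop with its i%2 parity tests, per-iteration indexing and two separate accumulators by a single pairwise iterator pass that adds each even-position element and subtracts its odd-position partner into one running total; no index, modulo test or indexing is maintained.
import Mathlib
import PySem

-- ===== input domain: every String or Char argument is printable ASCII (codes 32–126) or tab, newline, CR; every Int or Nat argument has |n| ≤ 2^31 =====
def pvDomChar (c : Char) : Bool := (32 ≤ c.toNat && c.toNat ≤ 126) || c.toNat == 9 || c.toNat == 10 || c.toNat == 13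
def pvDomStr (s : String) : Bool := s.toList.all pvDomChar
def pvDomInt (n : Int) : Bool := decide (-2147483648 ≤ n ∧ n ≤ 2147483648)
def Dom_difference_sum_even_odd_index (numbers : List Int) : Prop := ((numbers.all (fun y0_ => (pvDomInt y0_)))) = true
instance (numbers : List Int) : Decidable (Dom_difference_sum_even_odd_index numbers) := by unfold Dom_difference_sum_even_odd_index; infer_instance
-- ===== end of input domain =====

-- B replaces A's index-parity loop with a single pairwise pass adding/subtracting
-- consecutive elements into one running total (objective: simpler).

-- ===== PORT A =====
-- loop body of 'for i in range(len(numbers))'; numbers[i] is always in range here,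
-- so pyGetD with default 0 is exact; the third branch 'elif len(numbers)==0' is
-- unreachable (i%2 is 0 or not) and ports to the identity else-arm.
def pvBodyA (numbers : List Int) (oe : Int × Int) (i : Int) : Int × Int :=
  if PySem.Int.mod i 2 ≠ 0 then (oe.1 + PySem.List.pyGetD numbers i 0, oe.2)
  else if PySem.Int.mod i 2 = 0 then (oe.1, oe.2 + PySem.List.pyGetD numbers i 0)
  else oe

def difference_sum_even_odd_index (numbers : List Int) : Int :=
  let oe := (PySem.List.pyRange 0 (numbers.length : Int) 1).foldl (pvBodyA numbers) (0, 0)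
  oe.2 - oe.1

-- ===== PORT B =====
-- the 'for x in it' loop: each iteration consumes x and (via next(it, 0)) its partner.
def pvGoB : List Int → Int → Int
  | [], total => total
  | [x], total => total + x
  | x :: y :: rest, total => pvGoB rest (total + x - y)

def difference_sum_even_odd_index_alt (numbers : List Int) : Int :=
  pvGoB numbers 0

-- ===== PRECONDITION & SPEC =====
def Spec_difference_sum_even_odd_index (numbers : List Int) (out : Int) : Prop := out = difference_sum_even_odd_index_alt numbers
instance (numbers : List Int) (out : Int) : Decidable (Spec_difference_sum_even_odd_index numbers out) := by unfold Spec_difference_sum_even_odd_index; infer_instance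

-- ===== CLAIM (what is proved, stated in full; the proofs are below) =====
def Claim_equal_difference_sum_even_odd_index : Prop := ∀ (numbers : List Int), Dom_difference_sum_even_odd_index numbers → Spec_difference_sum_even_odd_index numbers (difference_sum_even_odd_index numbers)

-- ===== LEMMAS AND PROOFS =====

-- alternating sum: element at even position counts +, at odd position −
def pvAltd : List Int → Int
  | [] => 0
  | a :: l => a - pvAltd l

lemma pvGoB_eq (xs : List Int) (t : Int) : pvGoB xs t = t + pvAltd xs := by
  fun_induction pvGoB xs t with
  | case1 t => simp [pvAltd]
  | case2 x t => simp [pvAltd]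
  | case3 x y rest t ih => rw [ih]; simp [pvAltd]; ring

lemma pvKeyA : ∀ (suf pre : List Int) (odd even : Int),
    (((PySem.List.pyRange (pre.length : Int) ((pre.length : Int) + (suf.length : Int)) 1).foldl
        (pvBodyA (pre ++ suf)) (odd, even)).2 -
     ((PySem.List.pyRange (pre.length : Int) ((pre.length : Int) + (suf.length : Int)) 1).foldl
        (pvBodyA (pre ++ suf)) (odd, even)).1) =
    even - odd + (if pre.length % 2 = 0 then pvAltd suf else - pvAltd suf) := by
  intro suf
  induction suf with
  | nil =>
    intro pre odd even
    rw [PySem.List.pyRange_one_eq_nil (by simp)]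
    simp [pvAltd]
  | cons a t ih =>
    intro pre odd even
    rw [PySem.List.pyRange_one_cons (by
      have : pre.length < pre.length + (a :: t).length := by simp
      exact_mod_cast Nat.cast_lt.mpr this)]
    simp only [List.foldl_cons]
    have hget : PySem.List.pyGetD (pre ++ a :: t) (pre.length : Int) 0 = a := by
      simp [PySem.List.pyGetD_natCast]
    have hmod : PySem.Int.mod (pre.length : Int) 2 = ((pre.length % 2 : Nat) : Int) := by
      exact_mod_cast PySem.Int.mod_natCast pre.length 2
    have hr1 : ((pre.length : Int) + 1) = (((pre ++ [a]).length : Nat) : Int) := by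
      simp
    have hr2 : ((pre.length : Int) + ((a :: t).length : Int)) =
        (((pre ++ [a]).length : Nat) : Int) + ((t.length : Nat) : Int) := by
      simp; ring
    have hresh : pre ++ a :: t = (pre ++ [a]) ++ t := by simp
    rcases Nat.even_or_odd pre.length with he | ho
    · have h2 : pre.length % 2 = 0 := Nat.even_iff.mp he
      simp only [pvBodyA, hmod, hget, h2, Nat.cast_zero, ne_eq, not_true_eq_false,
        if_false, if_true]
      rw [hr1, hr2, hresh, ih (pre ++ [a]) odd (even + a)]
      have h2' : (pre ++ [a]).length % 2 = 1 := by
        simp [Nat.add_mod, h2]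
      rw [if_neg (by omega)]
      simp [pvAltd]; ring
    · have h2 : pre.length % 2 = 1 := Nat.odd_iff.mp ho
      simp only [pvBodyA, hmod, hget, h2, Nat.cast_one, ne_eq]
      rw [if_pos (by norm_num)]
      rw [hr1, hr2, hresh, ih (pre ++ [a]) (odd + a) even]
      have h2' : (pre ++ [a]).length % 2 = 0 := by
        simp [Nat.add_mod, h2]
      rw [if_pos h2', if_neg (by omega)]
      simp [pvAltd]; ring

-- ===== VERDICT (by name: the statement is the Claim_ definition above) =====
theorem difference_sum_even_odd_index_spec : Claim_equal_difference_sum_even_odd_index := by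
  intro numbers _
  unfold Spec_difference_sum_even_odd_index difference_sum_even_odd_index difference_sum_even_odd_index_alt
  have h := pvKeyA numbers [] 0 0
  simp only [List.nil_append, List.length_nil, Nat.cast_zero, zero_add] at h
  rw [pvGoB_eq]
  simp only [h]
  simp
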